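-- pv_equiv track=rewrite | github.com/kit-cis-lab/slack-attendance-report | lambda/attendance.py | create_ranking_text
-- ===== SOURCE A (Python) =====
-- def create_ranking_text(attd_cnt: dict) -> str:
--     """出勤数ランキングのテキストを作成する関数"""
--     sort_attd_cnt = sorted(attd_cnt.items(), key=lambda x: x[1], reverse=True)
--
--     text = ""
--     rank = 0
--     prev = float("inf")
--     for user_name, cnt in sort_attd_cnt:
--         if cnt < prev:
--             rank += 1
--             prev = cnt
--
--         text += f"{rank}位\t{user_name}\t{cnt}回\n"
--
--     return text
-- ===== SOURCE B (Python) =====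
-- def create_ranking_text(attd_cnt: dict) -> str:
--     """出勤数ランキングのテキストを作成する関数 (group-then-render decomposition)"""
--     ordered = sorted(attd_cnt.items(), key=lambda x: x[1], reverse=True)
--     # split the sorted sequence into maximal runs of equal count
--     groups = []
--     i = 0
--     while i < len(ordered):
--         j = i
--         while j < len(ordered) and ordered[j][1] == ordered[i][1]:
--             j += 1
--         groups.append(ordered[i:j])
--         i = j
--     # the dense rank of every member of a group is the group's 1-based index
--     lines = []
--     for rank, group in enumerate(groups, start=1):
--         for user_name, cnt in group:
--             lines.append(f"{rank}位\t{user_name}\t{cnt}回\n")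
--     return "".join(lines)
-- ===== Notes on version B (the rewrite author's own statement) =====
-- stated objective: alternative
-- what changed: A computes dense ranks in one accumulator pass over the sorted list with a float('inf') sentinel; B first splits the sorted list into maximal runs of equal count and then renders each run with its 1-based group index as the rank.
import Mathlib
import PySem

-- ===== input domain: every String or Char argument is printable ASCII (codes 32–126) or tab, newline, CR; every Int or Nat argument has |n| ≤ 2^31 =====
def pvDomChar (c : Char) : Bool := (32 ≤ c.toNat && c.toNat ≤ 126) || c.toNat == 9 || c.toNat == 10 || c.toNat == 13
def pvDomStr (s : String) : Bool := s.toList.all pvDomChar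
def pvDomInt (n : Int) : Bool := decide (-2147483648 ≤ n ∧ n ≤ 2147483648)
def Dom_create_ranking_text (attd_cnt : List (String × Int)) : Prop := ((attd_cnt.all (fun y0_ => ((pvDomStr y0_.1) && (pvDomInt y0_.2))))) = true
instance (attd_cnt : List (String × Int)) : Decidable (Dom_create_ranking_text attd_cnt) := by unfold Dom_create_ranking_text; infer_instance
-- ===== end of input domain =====

-- B replaces A's single accumulator pass (dense rank + float('inf') sentinel) by grouping the
-- sorted list into runs of equal count and rendering each run with its 1-based index as rank.

-- ===== PORT A =====
-- prev = float("inf") is only a sentinel: prev is +inf or an int from the list, so Option Int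
-- (none = +inf, which every int is < ) models the comparison exactly.
def pvStepA (st : String × Int × Option Int) (uc : String × Int) : String × Int × Option Int :=
  let text := st.1
  let rank := st.2.1
  let prev := st.2.2
  let rp :=
    if (match prev with | none => true | some p => decide (uc.2 < p)) = true
    then (rank + 1, some uc.2) else (rank, prev)
  (text ++ PySem.Int.toStr rp.1 ++ "位\t" ++ uc.1 ++ "\t" ++ PySem.Int.toStr uc.2 ++ "回\n",
   rp.1, rp.2)

def create_ranking_text (attd_cnt : List (String × Int)) : String :=
  let sort_attd_cnt := PySem.List.sorted attd_cnt (fun x => x.2) true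
  (sort_attd_cnt.foldl pvStepA ("", 0, none)).1

-- ===== PORT B =====
-- a line of the report
def pvFmt (rank : Int) (uc : String × Int) : String :=
  PySem.Int.toStr rank ++ "位\t" ++ uc.1 ++ "\t" ++ PySem.Int.toStr uc.2 ++ "回\n"

-- split into maximal runs of equal count (Source B's inner while-scan = takeWhile/dropWhile)
def pvGroupBy : List (String × Int) → List (List (String × Int))
  | [] => []
  | x :: xs =>
      (x :: xs.takeWhile (fun y => y.2 == x.2)) :: pvGroupBy (xs.dropWhile (fun y => y.2 == x.2))
termination_by l => l.length
decreasing_by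
  simp only [List.length_cons]
  exact Nat.lt_succ_of_le (List.length_dropWhile_le _ _)

-- render the groups, rank = 1-based group index (Source B's enumerate(start=1))
def pvRenderGroups (rank : Int) : List (List (String × Int)) → String
  | [] => ""
  | g :: gs => String.join (g.map (pvFmt rank)) ++ pvRenderGroups (rank + 1) gs

def create_ranking_text_alt (attd_cnt : List (String × Int)) : String :=
  let ordered := PySem.List.sorted attd_cnt (fun x => x.2) true
  pvRenderGroups 1 (pvGroupBy ordered)

-- ===== PRECONDITION & SPEC =====
def Spec_create_ranking_text (attd_cnt : List (String × Int)) (out : String) : Prop := out = create_ranking_text_alt attd_cnt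
instance (attd_cnt : List (String × Int)) (out : String) : Decidable (Spec_create_ranking_text attd_cnt out) := by unfold Spec_create_ranking_text; infer_instance

-- ===== CLAIM (what is proved, stated in full; the proofs are below) =====
def Claim_equal_create_ranking_text : Prop := ∀ (attd_cnt : List (String × Int)), Dom_create_ranking_text attd_cnt → Spec_create_ranking_text attd_cnt (create_ranking_text attd_cnt)

-- ===== LEMMAS AND PROOFS =====

theorem pvFoldl_append (l : List String) :
    ∀ s : String, l.foldl (fun r t => r ++ t) s = s ++ l.foldl (fun r t => r ++ t) "" := by
  induction l with
  | nil => intro s; simp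
  | cons a l ih =>
    intro s
    rw [List.foldl_cons, List.foldl_cons, ih (s ++ a), ih ("" ++ a)]
    simp [String.append_assoc]

theorem pvJoin_cons (a : String) (l : List String) :
    String.join (a :: l) = a ++ String.join l := by
  simp only [String.join, List.foldl_cons]
  rw [pvFoldl_append]
  simp

-- A's loop on a descending list, starting just after a line of count p was emitted at rank r:
-- it emits the rest of the p-run at rank r, then renders the remaining groups from rank r+1.
theorem pvLoopA_eq (l : List (String × Int)) :
    ∀ (text : String) (r p : Int),
      l.Pairwise (fun a b => b.2 ≤ a.2) →
      (∀ y ∈ l, y.2 ≤ p) →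
      (l.foldl pvStepA (text, r, some p)).1 =
        text ++ String.join ((l.takeWhile (fun y => y.2 == p)).map (pvFmt r)) ++
          pvRenderGroups (r + 1) (pvGroupBy (l.dropWhile (fun y => y.2 == p))) := by
  induction l with
  | nil =>
    intro text r p _ _
    simp only [List.foldl_nil, List.takeWhile_nil, List.dropWhile_nil, List.map_nil]
    rw [pvGroupBy]
    simp [pvRenderGroups, String.join]
  | cons x xs ih =>
    intro text r p hsort hle
    have hxle : x.2 ≤ p := hle x (List.mem_cons_self ..)
    have hsx : xs.Pairwise (fun a b => b.2 ≤ a.2) := (List.pairwise_cons.mp hsort).2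
    have hxs : ∀ y ∈ xs, y.2 ≤ x.2 := (List.pairwise_cons.mp hsort).1
    by_cases heq : x.2 = p
    · -- same count: rank unchanged, line joins the current run
      have hnotlt : ¬ x.2 < p := by omega
      have hstep : pvStepA (text, r, some p) x = (text ++ pvFmt r x, r, some p) := by
        simp [pvStepA, pvFmt, hnotlt, String.append_assoc]
      rw [List.foldl_cons, hstep, ih _ r p hsx (fun y hy => (hxs y hy).trans hxle)]
      rw [List.takeWhile_cons, List.dropWhile_cons]
      simp only [heq, beq_self_eq_true, if_pos, List.map_cons, pvJoin_cons]
      simp [String.append_assoc]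
    · -- strictly smaller count: a new group starts at rank r+1
      have hlt : x.2 < p := lt_of_le_of_ne hxle heq
      have hstep : pvStepA (text, r, some p) x = (text ++ pvFmt (r + 1) x, r + 1, some x.2) := by
        simp [pvStepA, pvFmt, hlt, String.append_assoc]
      rw [List.foldl_cons, hstep, ih _ (r + 1) x.2 hsx hxs]
      rw [List.takeWhile_cons, List.dropWhile_cons]
      have hbe : (x.2 == p) = false := by simp [heq]
      rw [hbe]
      simp only [Bool.false_eq_true, if_false]
      rw [pvGroupBy]
      simp only [pvRenderGroups, List.map_cons, pvJoin_cons]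
      simp [String.join, String.append_assoc]

theorem create_ranking_text_spec : Claim_equal_create_ranking_text := by
  intro attd_cnt _
  unfold Spec_create_ranking_text
  show (List.foldl pvStepA ("", 0, none) (PySem.List.sorted attd_cnt (fun x => x.2) true)).1
      = pvRenderGroups 1 (pvGroupBy (PySem.List.sorted attd_cnt (fun x => x.2) true))
  have hsort : (PySem.List.sorted attd_cnt (fun x : String × Int => x.2) true).Pairwise
      (fun a b => b.2 ≤ a.2) := PySem.List.sorted_pairwise_rev attd_cnt (fun x => x.2)
  generalize PySem.List.sorted attd_cnt (fun x => x.2) true = l at hsort ⊢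
  cases l with
  | nil => rw [pvGroupBy]; rfl
  | cons x xs =>
    have hsx : xs.Pairwise (fun a b => b.2 ≤ a.2) := (List.pairwise_cons.mp hsort).2
    have hxs : ∀ y ∈ xs, y.2 ≤ x.2 := (List.pairwise_cons.mp hsort).1
    have hstep : pvStepA ("", 0, none) x = ("" ++ pvFmt 1 x, 1, some x.2) := by
      simp [pvStepA, pvFmt, String.append_assoc]
    rw [List.foldl_cons, hstep, pvLoopA_eq xs _ 1 x.2 hsx hxs]
    rw [pvGroupBy]
    simp only [pvRenderGroups, List.map_cons, pvJoin_cons]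
    simp only [String.append_assoc]
    simp
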